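-- pv_equiv track=rewrite | github.com/alzeecyy/H1D024037-PraktikumKB-Pertemuan4 | tugaspert4.py | analisa_kerusakan
-- ===== SOURCE A (Python) =====
-- db_kerusakan = {
--     "Gangguan RAM (Memori)": {
--         "ciri": ["bunyi_beep", "restart_sendiri", "blue_screen"],
--         "penanganan": "Lepaskan RAM, bersihkan bagian pin emas dengan penghapus secara perlahan. Pasang kembali atau pindahkan ke slot lain. Jika masih error, kemungkinan RAM perlu diganti."
--     },
--     "Masalah Power Supply Unit": {
--         "ciri": ["mati_mendadak", "bau_gosong", "kipas_tidak_mutar"],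
--         "penanganan": "Cek kabel power dan stabilitas listrik. Jika tercium aroma hangus atau kipas mati, segera ganti PSU sebelum merusak komponen Motherboard lainnya."
--     },
--     "Overheating System": {
--         "ciri": ["kinerja_lambat", "mati_saat_berat", "kipas_berisik"],
--         "penanganan": "Bersihkan debu pada heatsink dan fan. Pastikan pasta termal (thermal paste) pada prosesor masih layak atau ganti dengan yang baru untuk suhu lebih optimal."
--     },
--     "Kerusakan Unit Grafis (VGA)": {
--         "ciri": ["layar_bergaris", "layar_blank", "game_crash"],
--         "penanganan": "Update driver ke versi terbaru. Bersihkan konektor VGA. Jika muncul artefak (garis permanen), biasanya ada masalah pada chipset GPU."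
--     },
--     "Storage Error (HDD/SSD)": {
--         "ciri": ["booting_lama", "file_corrupt", "bunyi_klik"],
--         "penanganan": "Segera lakukan backup data ke cloud atau eksternal. Gunakan software pengecek kesehatan disk. Ganti ke SSD jika performa sudah menurun drastis."
--     }
-- }
--
-- def analisa_kerusakan(list_gejala):
--     temuan = []
--
--     if not list_gejala:
--         return temuan
--
--     for nama_error, info in db_kerusakan.items():
--         syarat_error = set(info["ciri"])
--         pilihan_user = set(list_gejala)
--
--         # Mencari kecocokan gejala
--         match_count = len(syarat_error.intersection(pilihan_user))
--
--         if match_count >= 2: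
--             temuan.append({
--                 "kategori": nama_error,
--                 "tindakan": info["penanganan"]
--             })
--
--     return temuan
-- ===== SOURCE B (Python) =====
-- db_kerusakan = {
--     "Gangguan RAM (Memori)": {
--         "ciri": ["bunyi_beep", "restart_sendiri", "blue_screen"],
--         "penanganan": "Lepaskan RAM, bersihkan bagian pin emas dengan penghapus secara perlahan. Pasang kembali atau pindahkan ke slot lain. Jika masih error, kemungkinan RAM perlu diganti."
--     },
--     "Masalah Power Supply Unit": {
--         "ciri": ["mati_mendadak", "bau_gosong", "kipas_tidak_mutar"],
--         "penanganan": "Cek kabel power dan stabilitas listrik. Jika tercium aroma hangus atau kipas mati, segera ganti PSU sebelum merusak komponen Motherboard lainnya."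
--     },
--     "Overheating System": {
--         "ciri": ["kinerja_lambat", "mati_saat_berat", "kipas_berisik"],
--         "penanganan": "Bersihkan debu pada heatsink dan fan. Pastikan pasta termal (thermal paste) pada prosesor masih layak atau ganti dengan yang baru untuk suhu lebih optimal."
--     },
--     "Kerusakan Unit Grafis (VGA)": {
--         "ciri": ["layar_bergaris", "layar_blank", "game_crash"],
--         "penanganan": "Update driver ke versi terbaru. Bersihkan konektor VGA. Jika muncul artefak (garis permanen), biasanya ada masalah pada chipset GPU."
--     },
--     "Storage Error (HDD/SSD)": {
--         "ciri": ["booting_lama", "file_corrupt", "bunyi_klik"],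
--         "penanganan": "Segera lakukan backup data ke cloud atau eksternal. Gunakan software pengecek kesehatan disk. Ganti ke SSD jika performa sudah menurun drastis."
--     }
-- }
--
-- # Inverted index: symptom -> list of fault names whose 'ciri' contains it (built once).
-- _index = {}
-- for _nama, _info in db_kerusakan.items():
--     for _g in _info["ciri"]:
--         _index.setdefault(_g, []).append(_nama)
--
--
-- def analisa_kerusakan(list_gejala):
--     if not list_gejala:
--         return []
--     tally = {}
--     for g in set(list_gejala):
--         for nama in _index.get(g, []):
--             tally[nama] = tally.get(nama, 0) + 1
--     return [{"kategori": nama, "tindakan": info["penanganan"]}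
--             for nama, info in db_kerusakan.items() if tally.get(nama, 0) >= 2]
-- ===== Notes on version B (the rewrite author's own statement) =====
-- stated objective: alternative
-- what changed: Replaces the per-fault rebuild of set(list_gejala) and set intersection with a one-time inverted index (symptom -> fault names) plus a single tally pass over the deduplicated input, emitting matches in db order.
import Mathlib
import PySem

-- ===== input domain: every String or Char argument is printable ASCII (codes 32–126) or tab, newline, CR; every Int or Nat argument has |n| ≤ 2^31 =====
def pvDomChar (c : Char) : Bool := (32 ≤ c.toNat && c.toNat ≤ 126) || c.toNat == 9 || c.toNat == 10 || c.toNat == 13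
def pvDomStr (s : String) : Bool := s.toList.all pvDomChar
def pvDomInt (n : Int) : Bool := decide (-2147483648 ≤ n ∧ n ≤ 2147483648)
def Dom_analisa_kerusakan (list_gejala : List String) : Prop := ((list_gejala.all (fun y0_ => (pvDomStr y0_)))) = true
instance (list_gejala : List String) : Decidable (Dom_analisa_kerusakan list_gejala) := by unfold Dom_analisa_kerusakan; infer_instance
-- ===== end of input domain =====

-- B replaces A's per-fault rebuild of set(list_gejala) and set intersection by a one-time
-- inverted index (symptom -> fault names) plus a single tally pass over the deduplicated
-- input (objective: alternative decomposition; results emitted in db order, values unchanged).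

-- ===== PORT A =====
-- db_kerusakan: name -> (ciri, penanganan); the inner dict has the two fixed keys
-- "ciri"/"penanganan" whose values have different types, so it is modelled as a pair.
def pvDb : List (String × (List String × String)) :=
  [ ("Gangguan RAM (Memori)",
      (["bunyi_beep", "restart_sendiri", "blue_screen"],
       "Lepaskan RAM, bersihkan bagian pin emas dengan penghapus secara perlahan. Pasang kembali atau pindahkan ke slot lain. Jika masih error, kemungkinan RAM perlu diganti.")),
    ("Masalah Power Supply Unit",
      (["mati_mendadak", "bau_gosong", "kipas_tidak_mutar"],
       "Cek kabel power dan stabilitas listrik. Jika tercium aroma hangus atau kipas mati, segera ganti PSU sebelum merusak komponen Motherboard lainnya.")),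
    ("Overheating System",
      (["kinerja_lambat", "mati_saat_berat", "kipas_berisik"],
       "Bersihkan debu pada heatsink dan fan. Pastikan pasta termal (thermal paste) pada prosesor masih layak atau ganti dengan yang baru untuk suhu lebih optimal.")),
    ("Kerusakan Unit Grafis (VGA)",
      (["layar_bergaris", "layar_blank", "game_crash"],
       "Update driver ke versi terbaru. Bersihkan konektor VGA. Jika muncul artefak (garis permanen), biasanya ada masalah pada chipset GPU.")),
    ("Storage Error (HDD/SSD)",
      (["booting_lama", "file_corrupt", "bunyi_klik"],
       "Segera lakukan backup data ke cloud atau eksternal. Gunakan software pengecek kesehatan disk. Ganti ke SSD jika performa sudah menurun drastis.")) ]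

def analisa_kerusakan (list_gejala : List String) : List (List (String × String)) :=
  let temuan : List (List (String × String)) := []
  if list_gejala = [] then temuan
  else
    pvDb.foldl (fun temuan p =>
      let syarat_error := PySem.Set.ofList p.2.1
      let pilihan_user := PySem.Set.ofList list_gejala
      let match_count := (PySem.Set.inter syarat_error pilihan_user).length
      if match_count ≥ 2 then
        temuan ++ [[("kategori", p.1), ("tindakan", p.2.2)]]
      else temuan) temuan

-- ===== PORT B =====
-- module-level inverted index built once from the db;
-- 'index.setdefault(g, []).append(nama)' is 'modify g [] (· ++ [nama])'
def pvIndex : PySem.Dict String (List String) :=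
  pvDb.foldl (fun d p => p.2.1.foldl (fun d g => d.modify g [] (· ++ [p.1])) d) PySem.Dict.empty

def analisa_kerusakan_alt (list_gejala : List String) : List (List (String × String)) :=
  if list_gejala = [] then []
  else
    -- tally: fault name -> number of distinct input symptoms pointing at it
    -- (a dict only looked up afterwards, so the set's iteration order cannot matter)
    let tally : PySem.Dict String Int :=
      (PySem.Set.ofList list_gejala).foldl
        (fun t g => (pvIndex.getD g []).foldl (fun t nama => t.modify nama 0 (· + 1)) t)
        PySem.Dict.empty
    pvDb.foldl (fun out p =>
      if tally.getD p.1 0 ≥ 2 then out ++ [[("kategori", p.1), ("tindakan", p.2.2)]]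
      else out) []

-- ===== PRECONDITION & SPEC =====
def Spec_analisa_kerusakan (list_gejala : List String) (out : List (List (String × String))) : Prop := out = analisa_kerusakan_alt list_gejala
instance (list_gejala : List String) (out : List (List (String × String))) : Decidable (Spec_analisa_kerusakan list_gejala out) := by unfold Spec_analisa_kerusakan; infer_instance

-- ===== CLAIM (what is proved, stated in full; the proofs are below) =====
def Claim_equal_analisa_kerusakan : Prop := ∀ (list_gejala : List String), Dom_analisa_kerusakan list_gejala → Spec_analisa_kerusakan list_gejala (analisa_kerusakan list_gejala)

-- ===== LEMMAS AND PROOFS =====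

-- all symptoms occurring in the db (= the keys of pvIndex, in insertion order)
def pvSyms : List String :=
  ["bunyi_beep", "restart_sendiri", "blue_screen", "mati_mendadak", "bau_gosong",
   "kipas_tidak_mutar", "kinerja_lambat", "mati_saat_berat", "kipas_berisik",
   "layar_bergaris", "layar_blank", "game_crash", "booting_lama", "file_corrupt", "bunyi_klik"]

-- A's match_count: intersection length = countP of membership-in-the-input over the (duplicate-free) ciri list
theorem interLen (c l : List String) (hc : c.Nodup) :
    (PySem.Set.inter (PySem.Set.ofList c) (PySem.Set.ofList l)).length
      = List.countP (fun x => decide (x ∈ l)) c := by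
  rw [PySem.Set.ofList_eq_self_of_nodup c hc]
  simp [PySem.Set.inter, List.countP_eq_length_filter, PySem.Set.mem_ofList]

-- B's nested tally loop: the final count for a fault name is the total number of
-- occurrences of that name in the buckets of the traversed symptoms
theorem tally_getD_aux (nama : String) (u : List String) (d : PySem.Dict String Int) :
    ((u.foldl (fun t g => (pvIndex.getD g []).foldl (fun t nama => t.modify nama 0 (· + 1)) t) d).getD nama 0)
      = d.getD nama 0 + ((u.flatMap (fun g => pvIndex.getD g [])).count nama : Int) := by
  induction u generalizing d with
  | nil => simp
  | cons g u ih =>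
    rw [List.foldl_cons, ih, PySem.Dict.getD_foldl_modify_add_one, List.flatMap_cons,
        List.count_append]
    push_cast
    ring

-- bucket counts: a fault name occurs in a symptom's bucket once iff the symptom is in its ciri
theorem bucket_count (nama : String) (c : List String)
    (h : ∀ g : String, (pvIndex.getD g []).count nama = if g ∈ c then 1 else 0)
    (u : List String) :
    (u.flatMap (fun g => pvIndex.getD g [])).count nama
      = List.countP (fun g => decide (g ∈ c)) u := by
  induction u with
  | nil => simp
  | cons g u ih =>
    rw [List.flatMap_cons, List.count_append, ih, List.countP_cons, h g]
    by_cases hg : g ∈ c <;> simp [hg] <;> omega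

-- lift the per-symptom bucket fact, checked by decide on the finitely many db symptoms,
-- to arbitrary strings (outside the index's keys the bucket is empty)
theorem bucket_key (nama : String) (c : List String)
    (hc : ∀ g ∈ pvSyms, (pvIndex.getD g []).count nama = if g ∈ c then 1 else 0)
    (hsub : ∀ x ∈ c, x ∈ pvSyms) :
    ∀ g : String, (pvIndex.getD g []).count nama = if g ∈ c then 1 else 0 := by
  intro g
  by_cases hm : g ∈ pvSyms
  · exact hc g hm
  · have hkeys : pvIndex.keys = pvSyms := by decide
    have hnone : pvIndex.get? g = none := by
      rw [PySem.Dict.get?_eq_none_iff_not_mem_keys, hkeys]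
      exact hm
    rw [PySem.Dict.getD, hnone, if_neg (fun hx => hm (hsub g hx))]
    rfl

theorem count_dedup' (a : String) (l : List String) :
    (PySem.List.dedup l).count a = if a ∈ l then 1 else 0 := by
  by_cases h : a ∈ l
  · rw [if_pos h]
    exact List.count_eq_one_of_mem (PySem.List.nodup_dedup l) ((PySem.List.mem_dedup l a).mpr h)
  · rw [if_neg h]
    exact List.count_eq_zero.mpr (fun hm => h ((PySem.List.mem_dedup l a).mp hm))

theorem countP_mem_cons (a : String) (c d : List String) (ha : a ∉ c) :
    List.countP (fun g => decide (g ∈ a :: c)) d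
      = d.count a + List.countP (fun g => decide (g ∈ c)) d := by
  induction d with
  | nil => simp
  | cons x d ih =>
    simp only [List.countP_cons, List.count_cons, List.mem_cons, Bool.decide_or] at ih ⊢
    rw [ih]
    by_cases hx : x = a
    · subst hx; simp [ha]; omega
    · by_cases hc2 : x ∈ c <;> simp [hx, hc2] <;> omega

-- counting distinct input symptoms inside ciri = counting ciri symptoms inside the input
theorem countP_swap (c l : List String) (hc : c.Nodup) :
    List.countP (fun g => decide (g ∈ c)) (PySem.Set.ofList l)
      = List.countP (fun x => decide (x ∈ l)) c := by
  rw [← PySem.List.dedup_eq_ofList]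
  induction c with
  | nil => simp
  | cons a c ih =>
    rcases List.nodup_cons.mp hc with ⟨ha, hc'⟩
    rw [countP_mem_cons a c _ ha, List.countP_cons, ih hc', count_dedup' a l]
    by_cases h : a ∈ l <;> simp [h] <;> omega

-- B's tally entry for a fault = (cast of) A's match_count for that fault
theorem tally_eq_inter (l : List String) (nama : String) (c : List String)
    (hnd : c.Nodup) (hsub : ∀ x ∈ c, x ∈ pvSyms)
    (hcnt : ∀ g ∈ pvSyms, (pvIndex.getD g []).count nama = if g ∈ c then 1 else 0) :
    (((PySem.Set.ofList l).foldl
        (fun t g => (pvIndex.getD g []).foldl (fun t nama => t.modify nama 0 (· + 1)) t)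
        PySem.Dict.empty).getD nama 0)
      = ((PySem.Set.inter (PySem.Set.ofList c) (PySem.Set.ofList l)).length : Int) := by
  rw [tally_getD_aux, bucket_count nama c (bucket_key nama c hcnt hsub),
      countP_swap c l hnd, ← interLen c l hnd,
      show ((PySem.Dict.empty : PySem.Dict String Int).getD nama 0) = 0 from rfl, zero_add]

-- ===== VERDICT (by name: the statement is the Claim_ definition above) =====
theorem analisa_kerusakan_spec : Claim_equal_analisa_kerusakan := by
  intro l _
  unfold Spec_analisa_kerusakan
  by_cases hl : l = []
  · simp [analisa_kerusakan, analisa_kerusakan_alt, hl]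
  · simp only [analisa_kerusakan, analisa_kerusakan_alt, if_neg hl, pvDb,
      List.foldl_cons, List.foldl_nil, ge_iff_le]
    rw [tally_eq_inter l "Gangguan RAM (Memori)" ["bunyi_beep", "restart_sendiri", "blue_screen"] (by decide) (by decide) (by decide),
        tally_eq_inter l "Masalah Power Supply Unit" ["mati_mendadak", "bau_gosong", "kipas_tidak_mutar"] (by decide) (by decide) (by decide),
        tally_eq_inter l "Overheating System" ["kinerja_lambat", "mati_saat_berat", "kipas_berisik"] (by decide) (by decide) (by decide),
        tally_eq_inter l "Kerusakan Unit Grafis (VGA)" ["layar_bergaris", "layar_blank", "game_crash"] (by decide) (by decide) (by decide),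
        tally_eq_inter l "Storage Error (HDD/SSD)" ["booting_lama", "file_corrupt", "bunyi_klik"] (by decide) (by decide) (by decide)]
    norm_cast
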